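-- pv_equiv track=rewrite | github.com/csv610/CompGeom | src/compgeom/math_utils.py | peano_index_to_coords
-- ===== SOURCE A (Python) =====
-- from typing import TYPE_CHECKING, List, Optional, Tuple
--
-- def peano_index_to_coords(index: int, level: int) -> Tuple[int, int]:
--     """Convert a Peano curve index to 2D coordinates."""
--     x = y = px = py = 0
--     for power in range(level - 1, -1, -1):
--         power_of_three = 3**power
--         digit = (index // (9**power)) % 9
--         row = digit // 3
--         col = digit % 3 if row % 2 == 0 else 2 - (digit % 3)
--         if py % 2 == 1:
--             col = 2 - col
--         if px % 2 == 1: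
--             row = 2 - row
--         x += col * power_of_three
--         y += row * power_of_three
--         if col == 1:
--             px += 1
--         if row == 1:
--             py += 1
--     return x, y
-- ===== SOURCE B (Python) =====
-- def peano_index_to_coords(index: int, level: int):
--     """Peano index -> (x, y): extract all base-9 digits once with divmod,
--     precompute total reflection counts, then scan digits LSB-first with
--     decreasing counters (instead of MSB-first with growing counters and
--     per-step big powers)."""
--     if level <= 0:
--         return (0, 0)
--     digits = []
--     n = index
--     for _ in range(level):
--         n, d = divmod(n, 9)
--         digits.append(d)
--     hx = sum(d % 3 == 1 for d in digits)
--     hy = sum(d // 3 == 1 for d in digits)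
--     x = y = 0
--     p3 = 1
--     for d in digits:
--         hx -= d % 3 == 1
--         hy -= d // 3 == 1
--         row = d // 3
--         col = d % 3 if row % 2 == 0 else 2 - d % 3
--         if hy % 2 == 1:
--             col = 2 - col
--         if hx % 2 == 1:
--             row = 2 - row
--         x += col * p3
--         y += row * p3
--         p3 *= 3
--     return (x, y)
-- ===== Notes on version B (the rewrite author's own statement) =====
-- stated objective: faster
-- what changed: Replaces the MSB-first loop that recomputes 9**p and 3**p and grows reflection counters with a single divmod pass extracting all base-9 digits, precomputed total reflection counts, and an LSB-first scan that decrements the counters while multiplying the power of three incrementally.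
import Mathlib
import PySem

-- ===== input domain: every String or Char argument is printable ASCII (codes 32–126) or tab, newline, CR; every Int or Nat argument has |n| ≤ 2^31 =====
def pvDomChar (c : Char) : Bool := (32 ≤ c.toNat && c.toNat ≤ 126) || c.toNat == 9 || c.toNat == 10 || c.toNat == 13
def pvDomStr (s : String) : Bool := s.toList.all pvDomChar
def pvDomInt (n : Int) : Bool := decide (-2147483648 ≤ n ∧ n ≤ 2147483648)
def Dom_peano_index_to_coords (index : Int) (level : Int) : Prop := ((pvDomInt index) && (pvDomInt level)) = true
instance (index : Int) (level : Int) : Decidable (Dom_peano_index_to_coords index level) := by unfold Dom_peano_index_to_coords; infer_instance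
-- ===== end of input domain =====

-- B replaces A's MSB-first loop (fresh 9**p / 3**p each step, growing counters) by one divmod
-- digit-extraction pass, precomputed reflection totals and an LSB-first scan: measured constant-factor speedup.

-- ===== PORT A =====
-- loop body of A, fold state (x, y, px, py); 'power' is ≥ 0 on every iteration of A's range,
-- so Python's 3**power / 9**power is exactly 3 ^ power.toNat / 9 ^ power.toNat here
def pvStepA (index : Int) (st : Int × Int × Int × Int) (power : Int) : Int × Int × Int × Int :=
  let x := st.1; let y := st.2.1; let px := st.2.2.1; let py := st.2.2.2
  let power_of_three : Int := 3 ^ power.toNat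
  let digit := PySem.Int.mod (PySem.Int.floordiv index (9 ^ power.toNat)) 9
  let row := PySem.Int.floordiv digit 3
  let col := if PySem.Int.mod row 2 = 0 then PySem.Int.mod digit 3 else 2 - PySem.Int.mod digit 3
  let col := if PySem.Int.mod py 2 = 1 then 2 - col else col
  let row := if PySem.Int.mod px 2 = 1 then 2 - row else row
  let x := x + col * power_of_three
  let y := y + row * power_of_three
  let px := if col = 1 then px + 1 else px
  let py := if row = 1 then py + 1 else py
  (x, y, px, py)

def peano_index_to_coords (index : Int) (level : Int) : Int × Int :=
  let s := (PySem.List.pyRange (level - 1) (-1) (-1)).foldl (pvStepA index) (0, 0, 0, 0)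
  (s.1, s.2.1)

-- ===== PORT B =====
-- the divmod digit-extraction loop of Source B (LSB first)
def pvDigits : Int → Nat → List Int
  | _, 0 => []
  | n, k+1 => PySem.Int.mod n 9 :: pvDigits (PySem.Int.floordiv n 9) k

-- loop body of B, fold state (hx, hy, x, y, p3)
def pvStepB (st : Int × Int × Int × Int × Int) (d : Int) : Int × Int × Int × Int × Int :=
  let hx := st.1 - (if PySem.Int.mod d 3 = 1 then 1 else 0)
  let hy := st.2.1 - (if PySem.Int.floordiv d 3 = 1 then 1 else 0)
  let row := PySem.Int.floordiv d 3
  let col := if PySem.Int.mod row 2 = 0 then PySem.Int.mod d 3 else 2 - PySem.Int.mod d 3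
  let col := if PySem.Int.mod hy 2 = 1 then 2 - col else col
  let row := if PySem.Int.mod hx 2 = 1 then 2 - row else row
  (hx, hy, st.2.2.1 + col * st.2.2.2.2, st.2.2.2.1 + row * st.2.2.2.2, st.2.2.2.2 * 3)

def peano_index_to_coords_alt (index : Int) (level : Int) : Int × Int :=
  if level ≤ 0 then (0, 0)
  else
    let digits := pvDigits index level.toNat
    let hx : Int := digits.countP (fun d => decide (PySem.Int.mod d 3 = 1))
    let hy : Int := digits.countP (fun d => decide (PySem.Int.floordiv d 3 = 1))
    let s := digits.foldl pvStepB (hx, hy, 0, 0, 1)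
    (s.2.2.1, s.2.2.2.1)

-- ===== PRECONDITION & SPEC =====
def Spec_peano_index_to_coords (index : Int) (level : Int) (out : Int × Int) : Prop := out = peano_index_to_coords_alt index level
instance (index : Int) (level : Int) (out : Int × Int) : Decidable (Spec_peano_index_to_coords index level out) := by unfold Spec_peano_index_to_coords; infer_instance

-- ===== CLAIM (what is proved, stated in full; the proofs are below) =====
def Claim_equal_peano_index_to_coords : Prop := ∀ (index : Int) (level : Int), Dom_peano_index_to_coords index level → Spec_peano_index_to_coords index level (peano_index_to_coords index level)

-- ===== LEMMAS AND PROOFS =====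

-- the base-9 digit of index at position p
def pvDigAt (index : Int) (p : Nat) : Int := PySem.Int.mod (PySem.Int.floordiv index (9 ^ p)) 9

def pvC1 (index : Int) (p : Nat) : Bool := decide (PySem.Int.mod (pvDigAt index p) 3 = 1)
def pvR1 (index : Int) (p : Nat) : Bool := decide (PySem.Int.floordiv (pvDigAt index p) 3 = 1)

-- count of col==1 (resp. row==1) positions in [k, L)
def pvCntC (index : Int) (k L : Nat) : Int := ((List.range' k (L - k)).countP (pvC1 index) : Int)
def pvCntR (index : Int) (k L : Nat) : Int := ((List.range' k (L - k)).countP (pvR1 index) : Int)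

-- the column / row produced by digit d under reflection parity f
def pvColOf (d f : Int) : Int :=
  let row0 := PySem.Int.floordiv d 3
  let c0 := if PySem.Int.mod row0 2 = 0 then PySem.Int.mod d 3 else 2 - PySem.Int.mod d 3
  if PySem.Int.mod f 2 = 1 then 2 - c0 else c0

def pvRowOf (d f : Int) : Int :=
  let row0 := PySem.Int.floordiv d 3
  if PySem.Int.mod f 2 = 1 then 2 - row0 else row0

-- A's loop as a recursion MSB-first over positions n-1 .. 0 with reflection counters px py
def pvG (index : Int) : Nat → Int → Int → Int × Int
  | 0, _, _ => (0, 0)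
  | p+1, px, py =>
    let col := pvColOf (pvDigAt index p) py
    let row := pvRowOf (pvDigAt index p) px
    let s := pvG index p (px + (if col = 1 then 1 else 0)) (py + (if row = 1 then 1 else 0))
    (col * 3 ^ p + s.1, row * 3 ^ p + s.2)

theorem pvColOf_eq_one (d f : Int) : (pvColOf d f = 1) ↔ PySem.Int.mod d 3 = 1 := by
  simp only [pvColOf]; split_ifs <;> omega

theorem pvRowOf_eq_one (d f : Int) : (pvRowOf d f = 1) ↔ PySem.Int.floordiv d 3 = 1 := by
  simp only [pvRowOf]; split_ifs <;> omega

theorem pvA_fold (index : Int) : ∀ (p : Nat) (x y px py : Int),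
    ((PySem.List.pyRange ((p : Int) - 1) (-1) (-1)).foldl (pvStepA index) (x, y, px, py)).1
      = x + (pvG index p px py).1
    ∧ ((PySem.List.pyRange ((p : Int) - 1) (-1) (-1)).foldl (pvStepA index) (x, y, px, py)).2.1
      = y + (pvG index p px py).2 := by
  intro p
  induction p with
  | zero =>
    intro x y px py
    rw [PySem.List.pyRange_neg_one_eq_nil (by norm_num)]
    simp [pvG]
  | succ p ih =>
    intro x y px py
    rw [show ((p + 1 : Nat) : Int) - 1 = (p : Int) by push_cast; ring,
        PySem.List.pyRange_neg_one_cons (by omega)]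
    simp only [List.foldl_cons]
    have hstep : pvStepA index (x, y, px, py) (p : Int)
        = (x + pvColOf (pvDigAt index p) py * 3 ^ p,
           y + pvRowOf (pvDigAt index p) px * 3 ^ p,
           px + (if pvColOf (pvDigAt index p) py = 1 then 1 else 0),
           py + (if pvRowOf (pvDigAt index p) px = 1 then 1 else 0)) := by
      simp only [pvStepA, pvColOf, pvRowOf, pvDigAt, Int.toNat_natCast]
      split_ifs <;> simp_all <;> omega
    rw [hstep]
    have := ih (x + pvColOf (pvDigAt index p) py * 3 ^ p)
      (y + pvRowOf (pvDigAt index p) px * 3 ^ p)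
      (px + (if pvColOf (pvDigAt index p) py = 1 then 1 else 0))
      (py + (if pvRowOf (pvDigAt index p) px = 1 then 1 else 0))
    constructor
    · rw [this.1]; simp only [pvG]; ring
    · rw [this.2]; simp only [pvG]; ring

theorem pvCntR_top (index : Int) (n : Nat) : pvCntR index (n + 1) (n + 1) = 0 := by
  simp [pvCntR]

theorem pvCntC_top (index : Int) (n : Nat) : pvCntC index (n + 1) (n + 1) = 0 := by
  simp [pvCntC]

theorem pvCntR_succ_top (index : Int) (p n : Nat) (h : p + 1 ≤ n) :
    pvCntR index (p + 1) (n + 1) = pvCntR index (p + 1) n + (if pvR1 index n then 1 else 0) := by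
  unfold pvCntR
  rw [show n + 1 - (p + 1) = (n - (p + 1)) + 1 by omega, List.range'_concat, List.countP_append,
      show p + 1 + 1 * (n - (p + 1)) = n by omega]
  simp [List.countP_cons]

theorem pvCntC_succ_top (index : Int) (p n : Nat) (h : p + 1 ≤ n) :
    pvCntC index (p + 1) (n + 1) = pvCntC index (p + 1) n + (if pvC1 index n then 1 else 0) := by
  unfold pvCntC
  rw [show n + 1 - (p + 1) = (n - (p + 1)) + 1 by omega, List.range'_concat, List.countP_append,
      show p + 1 + 1 * (n - (p + 1)) = n by omega]
  simp [List.countP_cons]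

theorem pvG_spec (index : Int) : ∀ (n : Nat) (px py : Int),
    (pvG index n px py).1
      = ((List.range n).map (fun p => pvColOf (pvDigAt index p) (py + pvCntR index (p + 1) n) * 3 ^ p)).sum
    ∧ (pvG index n px py).2
      = ((List.range n).map (fun p => pvRowOf (pvDigAt index p) (px + pvCntC index (p + 1) n) * 3 ^ p)).sum := by
  intro n
  induction n with
  | zero => intro px py; simp [pvG]
  | succ n ih =>
    intro px py
    have hcol1 : (if pvColOf (pvDigAt index n) py = 1 then (1 : Int) else 0)
        = (if pvC1 index n then 1 else 0) := by
      simp [pvC1, pvColOf_eq_one]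
    have hrow1 : (if pvRowOf (pvDigAt index n) px = 1 then (1 : Int) else 0)
        = (if pvR1 index n then 1 else 0) := by
      simp [pvR1, pvRowOf_eq_one]
    have hG : pvG index (n + 1) px py
        = (pvColOf (pvDigAt index n) py * 3 ^ n
            + (pvG index n (px + (if pvC1 index n then 1 else 0)) (py + (if pvR1 index n then 1 else 0))).1,
           pvRowOf (pvDigAt index n) px * 3 ^ n
            + (pvG index n (px + (if pvC1 index n then 1 else 0)) (py + (if pvR1 index n then 1 else 0))).2) := by
      conv_lhs => rw [pvG]
      rw [← hcol1, ← hrow1]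
    obtain ⟨ih1, ih2⟩ := ih (px + (if pvC1 index n then 1 else 0)) (py + (if pvR1 index n then 1 else 0))
    rw [hG]
    constructor
    · simp only [ih1]
      rw [List.range_succ, List.map_append, List.sum_append]
      simp only [List.map_cons, List.map_nil, List.sum_cons, List.sum_nil]
      rw [pvCntR_top]
      have hmap : ∀ p ∈ List.range n,
          pvColOf (pvDigAt index p) (py + (if pvR1 index n then 1 else 0) + pvCntR index (p + 1) n) * 3 ^ p
            = pvColOf (pvDigAt index p) (py + pvCntR index (p + 1) (n + 1)) * 3 ^ p := by
        intro p hp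
        rw [pvCntR_succ_top index p n (by simpa using List.mem_range.mp hp)]
        ring_nf
      rw [List.map_congr_left hmap]
      ring
    · simp only [ih2]
      rw [List.range_succ, List.map_append, List.sum_append]
      simp only [List.map_cons, List.map_nil, List.sum_cons, List.sum_nil]
      rw [pvCntC_top]
      have hmap : ∀ p ∈ List.range n,
          pvRowOf (pvDigAt index p) (px + (if pvC1 index n then 1 else 0) + pvCntC index (p + 1) n) * 3 ^ p
            = pvRowOf (pvDigAt index p) (px + pvCntC index (p + 1) (n + 1)) * 3 ^ p := by
        intro p hp
        rw [pvCntC_succ_top index p n (by simpa using List.mem_range.mp hp)]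
        ring_nf
      rw [List.map_congr_left hmap]
      ring

-- B's digit list is the list of pvDigAt values
theorem pvFloordiv_floordiv (a : Int) (p : Nat) :
    PySem.Int.floordiv (PySem.Int.floordiv a 9) (9 ^ p) = PySem.Int.floordiv a (9 ^ (p + 1)) := by
  rw [PySem.Int.floordiv_eq_ediv_of_pos (b := 9 ^ p) (by positivity),
      PySem.Int.floordiv_eq_ediv_of_pos (b := 9) (by norm_num),
      PySem.Int.floordiv_eq_ediv_of_pos (b := 9 ^ (p + 1)) (by positivity),
      Int.ediv_ediv_of_nonneg (by norm_num)]
  congr 1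
  rw [pow_succ]
  ring

theorem pvDigits_eq (L : Nat) : ∀ index : Int, pvDigits index L = (List.range L).map (pvDigAt index) := by
  induction L with
  | zero => intro index; simp [pvDigits]
  | succ L ih =>
    intro index
    rw [List.range_succ_eq_map]
    simp only [pvDigits, List.map_cons, List.map_map]
    congr 1
    · simp [pvDigAt]
    · rw [ih (PySem.Int.floordiv index 9)]
      congr 1
      funext p
      show pvDigAt (PySem.Int.floordiv index 9) p = pvDigAt index (p + 1)
      unfold pvDigAt
      rw [pvFloordiv_floordiv]

theorem pvCntC_step (index : Int) (k n : Nat) :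
    pvCntC index k (k + (n + 1)) - (if pvC1 index k then 1 else 0) = pvCntC index (k + 1) (k + (n + 1)) := by
  unfold pvCntC
  rw [show k + (n + 1) - k = n + 1 by omega, List.range'_succ, List.countP_cons,
      show k + (n + 1) - (k + 1) = n by omega]
  split_ifs <;> simp_all <;> omega

theorem pvCntR_step (index : Int) (k n : Nat) :
    pvCntR index k (k + (n + 1)) - (if pvR1 index k then 1 else 0) = pvCntR index (k + 1) (k + (n + 1)) := by
  unfold pvCntR
  rw [show k + (n + 1) - k = n + 1 by omega, List.range'_succ, List.countP_cons,
      show k + (n + 1) - (k + 1) = n by omega]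
  split_ifs <;> simp_all <;> omega

theorem pvB_fold (index : Int) (L : Nat) : ∀ (n k : Nat), k + n = L → ∀ x y : Int,
    (((List.range' k n).foldl (fun st p => pvStepB st (pvDigAt index p))
        (pvCntC index k L, pvCntR index k L, x, y, (3 : Int) ^ k)).2.2.1
      = x + ((List.range' k n).map (fun p => pvColOf (pvDigAt index p) (pvCntR index (p + 1) L) * 3 ^ p)).sum)
    ∧ (((List.range' k n).foldl (fun st p => pvStepB st (pvDigAt index p))
        (pvCntC index k L, pvCntR index k L, x, y, (3 : Int) ^ k)).2.2.2.1
      = y + ((List.range' k n).map (fun p => pvRowOf (pvDigAt index p) (pvCntC index (p + 1) L) * 3 ^ p)).sum) := by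
  intro n
  induction n with
  | zero => intro k hk x y; simp
  | succ n ih =>
    intro k hk x y
    rw [List.range'_succ]
    simp only [List.foldl_cons, List.map_cons, List.sum_cons]
    have hstep : pvStepB (pvCntC index k L, pvCntR index k L, x, y, (3 : Int) ^ k) (pvDigAt index k)
        = (pvCntC index (k + 1) L, pvCntR index (k + 1) L,
           x + pvColOf (pvDigAt index k) (pvCntR index (k + 1) L) * 3 ^ k,
           y + pvRowOf (pvDigAt index k) (pvCntC index (k + 1) L) * 3 ^ k,
           (3 : Int) ^ (k + 1)) := by
      have hc := pvCntC_step index k n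
      have hr := pvCntR_step index k n
      rw [← hk] at *
      simp only [pvStepB, pvColOf, pvRowOf]
      rw [show (if PySem.Int.mod (pvDigAt index k) 3 = 1 then (1:Int) else 0)
            = (if pvC1 index k then 1 else 0) by simp [pvC1],
          show (if PySem.Int.floordiv (pvDigAt index k) 3 = 1 then (1:Int) else 0)
            = (if pvR1 index k then 1 else 0) by simp [pvR1]]
      rw [hc, hr]
      have : (3 : Int) ^ k * 3 = 3 ^ (k + 1) := by rw [pow_succ]
      rw [this]
    rw [hstep]
    obtain ⟨ih1, ih2⟩ := ih (k + 1) (by omega)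
      (x + pvColOf (pvDigAt index k) (pvCntR index (k + 1) L) * 3 ^ k)
      (y + pvRowOf (pvDigAt index k) (pvCntC index (k + 1) L) * 3 ^ k)
    constructor
    · rw [ih1]; ring
    · rw [ih2]; ring

-- ===== VERDICT (by name: the statement is the Claim_ definition above) =====
theorem peano_index_to_coords_spec : Claim_equal_peano_index_to_coords := by
  unfold Claim_equal_peano_index_to_coords Spec_peano_index_to_coords
  intro index level _
  by_cases hl : level ≤ 0
  · unfold peano_index_to_coords peano_index_to_coords_alt
    rw [PySem.List.pyRange_neg_one_eq_nil (by omega)]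
    simp [hl]
  · push_neg at hl
    set L := level.toNat with hL
    have hlev : (L : Int) = level := Int.toNat_of_nonneg (by omega)
    unfold peano_index_to_coords peano_index_to_coords_alt
    rw [if_neg (by omega)]
    simp only
    rw [← hlev]
    simp only [Int.toNat_natCast]
    have hA := pvA_fold index L 0 0 0 0
    have hG := pvG_spec index L 0 0
    have hdig := pvDigits_eq L index
    have hcntC : ((pvDigits index L).countP (fun d => decide (PySem.Int.mod d 3 = 1)) : Int)
        = pvCntC index 0 L := by
      rw [hdig, List.countP_map, pvCntC, List.range_eq_range']
      rfl
    have hcntR : ((pvDigits index L).countP (fun d => decide (PySem.Int.floordiv d 3 = 1)) : Int)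
        = pvCntR index 0 L := by
      rw [hdig, List.countP_map, pvCntR, List.range_eq_range']
      rfl
    have hfold : (pvDigits index L).foldl pvStepB
          ((((pvDigits index L).countP (fun d => decide (PySem.Int.mod d 3 = 1)) : Nat) : Int),
           (((pvDigits index L).countP (fun d => decide (PySem.Int.floordiv d 3 = 1)) : Nat) : Int),
           0, 0, 1)
        = (List.range' 0 L).foldl (fun st p => pvStepB st (pvDigAt index p))
            (pvCntC index 0 L, pvCntR index 0 L, 0, 0, (3 : Int) ^ 0) := by
      rw [hcntC, hcntR]
      conv_lhs => rw [hdig]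
      rw [List.range_eq_range', List.foldl_map, pow_zero]
    have hB := pvB_fold index L L 0 (by omega) 0 0
    rw [hfold]
    apply Prod.ext
    · show _ = (_ : Int)
      rw [hA.1, hG.1, hB.1]
      simp [List.range_eq_range']
    · show _ = (_ : Int)
      rw [hA.2, hG.2, hB.2]
      simp [List.range_eq_range']
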